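-- pv_equiv track=rewrite | github.com/Bangatto/Braille_Translator | to_unicode.py | raisedpos_to_binary
-- ===== SOURCE A (Python) =====
-- def raisedpos_to_binary(s):
--     ''' (str) -> str
--     Convert a string representing a braille character in raised-position
--     representation  into the binary representation.
--     TODO: For students to complete.
--
--     >>> raisedpos_to_binary('')
--     '00000000'
--     >>> raisedpos_to_binary('142536')
--     '11111100'
--     >>> raisedpos_to_binary('14253678')
--     '11111111'
--     >>> raisedpos_to_binary('123')
--     '11100000'
--     >>> raisedpos_to_binary('125')
--     '11001000'
--     '''
--     numb="" # an empty str to keep count of my numbers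
--     for element in range(1,9):# i loop through all my 8 elements
--         if str(element) in s:
--             numb+=str(1) # i add 1 if my str is a raised digit
--         else:
--             numb+=str(0) # i concaternate a 0 when its not a raised digit
--     return numb
-- ===== SOURCE B (Python) =====
-- def raisedpos_to_binary(s):
--     '''Input-driven re-implementation: scan s once and mark a
--     position-indexed bit array, instead of testing each of the 8
--     positions for membership in s.'''
--     bits = ['0'] * 8
--     for ch in s:
--         if '1' <= ch <= '8':
--             bits[ord(ch) - ord('1')] = '1'
--     return ''.join(bits)
-- ===== Notes on version B (the rewrite author's own statement) =====
-- stated objective: alternative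
-- what changed: Instead of looping over positions 1..8 and testing substring membership in s, B scans the input once and sets bits in a fixed 8-slot array indexed by each digit character.
import Mathlib
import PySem

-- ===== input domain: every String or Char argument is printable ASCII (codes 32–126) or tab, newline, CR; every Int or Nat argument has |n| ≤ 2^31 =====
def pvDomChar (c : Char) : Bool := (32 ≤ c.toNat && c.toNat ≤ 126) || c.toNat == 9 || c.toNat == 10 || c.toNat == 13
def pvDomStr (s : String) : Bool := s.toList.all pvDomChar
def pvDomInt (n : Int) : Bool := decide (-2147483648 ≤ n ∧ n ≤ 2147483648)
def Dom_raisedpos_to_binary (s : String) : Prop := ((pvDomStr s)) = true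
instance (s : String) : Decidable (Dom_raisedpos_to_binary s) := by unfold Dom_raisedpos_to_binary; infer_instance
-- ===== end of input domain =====

-- B scans the input once and marks a position-indexed 8-slot array, instead of
-- testing each of the 8 positions for substring membership in s (alternative decomposition).


-- ===== PORT A =====
-- the Python str accumulator is handled as List Char (PySem convention)
def raisedpos_to_binary (s : String) : String :=
  String.mk ((PySem.List.pyRange 1 9 1).foldl (fun numb element =>
    if PySem.Str.isIn (PySem.Int.toStr element) s then
      numb ++ (PySem.Int.toChars 1)
    else
      numb ++ (PySem.Int.toChars 0)) [])

-- ===== PORT B =====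
def raisedpos_to_binary_alt (s : String) : String :=
  String.mk (s.toList.foldl (fun bits ch =>
    if '1' ≤ ch ∧ ch ≤ '8' then bits.set (ch.toNat - 49) '1' else bits)
    ['0','0','0','0','0','0','0','0'])

-- ===== PRECONDITION & SPEC =====
def Spec_raisedpos_to_binary (s : String) (out : String) : Prop := out = raisedpos_to_binary_alt s
instance (s : String) (out : String) : Decidable (Spec_raisedpos_to_binary s out) := by unfold Spec_raisedpos_to_binary; infer_instance

-- ===== CLAIM (what is proved, stated in full; the proofs are below) =====
def Claim_equal_raisedpos_to_binary : Prop := ∀ (s : String), Dom_raisedpos_to_binary s → Spec_raisedpos_to_binary s (raisedpos_to_binary s)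

-- ===== LEMMAS AND PROOFS =====

def pvStep (bits : List Char) (ch : Char) : List Char :=
  if '1' ≤ ch ∧ ch ≤ '8' then bits.set (ch.toNat - 49) '1' else bits

lemma pvStep_length (b : List Char) (c : Char) : (pvStep b c).length = b.length := by
  unfold pvStep; split <;> simp

lemma pvFold_length (l : List Char) (b : List Char) :
    (l.foldl pvStep b).length = b.length := by
  induction l generalizing b with
  | nil => rfl
  | cons c t ih => simp [List.foldl, ih, pvStep_length]

lemma pvChar_le_iff (c d : Char) : c ≤ d ↔ c.toNat ≤ d.toNat := Iff.rfl

lemma pvToNat_ofNat (n : Nat) (h : n < 55296) : (Char.ofNat n).toNat = n := by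
  simp [Char.ofNat, Char.ofNatAux, Char.toNat, Nat.isValidChar, h]

lemma pvChar_eq_of_toNat (c d : Char) (h : c.toNat = d.toNat) : c = d :=
  Char.ext (UInt32.toNat_inj.mp h)

lemma pvFold_get (l : List Char) (b : List Char) (i : Nat) (hi : i < b.length)
    (hi8 : i < 8) :
    (l.foldl pvStep b)[i]'(by rw [pvFold_length]; exact hi)
      = if (Char.ofNat (i + 49)) ∈ l then '1' else b[i] := by
  induction l generalizing b with
  | nil => simp
  | cons c t ih =>
    have hv : (Char.ofNat (i + 49)).toNat = i + 49 := pvToNat_ofNat _ (by omega)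
    have hb' : i < (pvStep b c).length := by rw [pvStep_length]; exact hi
    have hrec := ih (pvStep b c) hb'
    simp only [List.foldl_cons, hrec]
    by_cases hc : '1' ≤ c ∧ c ≤ '8'
    · have h49 : 49 ≤ c.toNat := hc.1
      have h56 : c.toNat ≤ 56 := hc.2
      by_cases he : c.toNat = i + 49
      · have hce : c = Char.ofNat (i + 49) := pvChar_eq_of_toNat _ _ (he.trans hv.symm)
        have hidx : c.toNat - 49 = i := by omega
        rw [← hce]
        by_cases hm : c ∈ t
        · simp [hm]
        · simp [hm, pvStep, hc, hidx, List.getElem_set_self]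
      · have hne : Char.ofNat (i + 49) ≠ c := by
          intro h
          exact he (by rw [← h]; exact hv)
        have hidx : c.toNat - 49 ≠ i := by omega
        simp [pvStep, hc, hne, hidx]
    · have hne : Char.ofNat (i + 49) ≠ c := by
        intro h
        apply hc
        rw [← h]
        have h1 : '1'.toNat = 49 := rfl
        have h8 : '8'.toNat = 56 := rfl
        exact ⟨(pvChar_le_iff _ _).mpr (by rw [hv, h1]; omega),
               (pvChar_le_iff _ _).mpr (by rw [hv, h8]; omega)⟩
      simp [pvStep, hc, hne]

lemma pvIsIn_singleton (c : Char) (s : String) :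
    PySem.Str.isIn (String.mk [c]) s = true ↔ c ∈ s.toList := by
  rw [PySem.Str.isIn_iff_infix]
  have hl : (String.mk [c]).toList = [c] := String.toList_ofList
  rw [hl]
  constructor
  · intro h
    exact h.sublist.mem (by simp)
  · intro h
    obtain ⟨u, v, huv⟩ := List.append_of_mem h
    exact ⟨u, v, by simp [huv]⟩

def gA (s : String) (e : Int) : Char :=
  if PySem.Str.isIn (PySem.Int.toStr e) s then '1' else '0'

lemma gA_mem (s : String) (e : Int) (c : Char) (h : PySem.Int.toStr e = String.mk [c]) :
    gA s e = if c ∈ s.toList then '1' else '0' := by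
  unfold gA
  rw [h]
  by_cases hm : c ∈ s.toList
  · rw [if_pos ((pvIsIn_singleton c s).mpr hm), if_pos hm]
  · rw [if_neg (fun hx => hm ((pvIsIn_singleton c s).mp hx)), if_neg hm]

lemma pvFoldAppendMap {α : Type} (f : α → Char) (l : List α) (a : List Char) :
    l.foldl (fun acc e => acc ++ [f e]) a = a ++ l.map f := by
  induction l generalizing a with
  | nil => simp
  | cons x t ih => simp [List.foldl_cons, ih]

theorem pv_main (s : String) :
    raisedpos_to_binary s = raisedpos_to_binary_alt s := by
  unfold raisedpos_to_binary raisedpos_to_binary_alt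
  apply congrArg String.mk
  have hrange : PySem.List.pyRange 1 9 1 = [1,2,3,4,5,6,7,8] := by decide
  rw [hrange]
  have hfold : s.toList.foldl (fun bits ch =>
      if '1' ≤ ch ∧ ch ≤ '8' then bits.set (ch.toNat - 49) '1' else bits)
      ['0','0','0','0','0','0','0','0']
      = s.toList.foldl pvStep ['0','0','0','0','0','0','0','0'] := rfl
  rw [hfold]
  have hc1 : PySem.Int.toChars 1 = ['1'] := by decide
  have hc0 : PySem.Int.toChars 0 = ['0'] := by decide
  have hstepA : (fun (numb : List Char) (e : Int) =>
      if PySem.Str.isIn (PySem.Int.toStr e) s then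
        numb ++ (PySem.Int.toChars 1)
      else
        numb ++ (PySem.Int.toChars 0))
      = fun numb e => numb ++ [gA s e] := by
    funext n e
    simp only [hc1, hc0, gA]
    split <;> rfl
  have hA : ([1,2,3,4,5,6,7,8] : List Int).foldl (fun numb element =>
      if PySem.Str.isIn (PySem.Int.toStr element) s then
        numb ++ (PySem.Int.toChars 1)
      else
        numb ++ (PySem.Int.toChars 0)) []
      = [gA s 1, gA s 2, gA s 3, gA s 4, gA s 5, gA s 6, gA s 7, gA s 8] := by
    rw [hstepA, pvFoldAppendMap (gA s) [1,2,3,4,5,6,7,8] []]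
    rfl
  rw [hA,
    gA_mem s 1 '1' (by decide), gA_mem s 2 '2' (by decide),
    gA_mem s 3 '3' (by decide), gA_mem s 4 '4' (by decide),
    gA_mem s 5 '5' (by decide), gA_mem s 6 '6' (by decide),
    gA_mem s 7 '7' (by decide), gA_mem s 8 '8' (by decide)]
  apply List.ext_getElem
  · rw [pvFold_length]
    rfl
  · intro i h1 h2
    have hi8 : i < 8 := by simpa using h1
    rw [pvFold_get s.toList _ i (by simpa using hi8) hi8]
    interval_cases i <;>
      simp [show Char.ofNat (0+49) = '1' from by decide,
            show Char.ofNat (1+49) = '2' from by decide,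
            show Char.ofNat (2+49) = '3' from by decide,
            show Char.ofNat (3+49) = '4' from by decide,
            show Char.ofNat (4+49) = '5' from by decide,
            show Char.ofNat (5+49) = '6' from by decide,
            show Char.ofNat (6+49) = '7' from by decide,
            show Char.ofNat (7+49) = '8' from by decide]

-- ===== VERDICT (by name: the statement is the Claim_ definition above) =====
theorem raisedpos_to_binary_spec : Claim_equal_raisedpos_to_binary := by
  intro s _
  unfold Spec_raisedpos_to_binary
  exact pv_main s
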